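-- pv_equiv track=rewrite | github.com/ahwassa10/BinaryEquationSolver | tparser.py | wltokenize
-- ===== SOURCE A (Python) =====
-- def wltokenize(inputString, tokenCharacters):
--     tokens = []
--
--     inputIterator = 0
--     stopIterator = len(inputString)
--
--     while inputIterator < stopIterator:
--         atCharacter = inputString[inputIterator]
--         if atCharacter in tokenCharacters:
--             tempToken = atCharacter
--             while inputIterator < (stopIterator - 1):
--                 tempCharacter = inputString[inputIterator + 1]
--                 if tempCharacter in tokenCharacters:
--                     tempToken = tempToken + tempCharacter
--                     inputIterator += 1
--                 else:
--                     break
--             tokens.append(tempToken)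
--         inputIterator += 1
--
--     return tokens
-- ===== SOURCE B (Python) =====
-- def wltokenize(inputString, tokenCharacters):
--     tokens = []
--     run = []
--     for ch in inputString:
--         if ch in tokenCharacters:
--             run.append(ch)
--         elif run:
--             tokens.append(''.join(run))
--             run = []
--     if run:
--         tokens.append(''.join(run))
--     return tokens
-- ===== Notes on version B (the rewrite author's own statement) =====
-- stated objective: simpler
-- what changed: Replaced the nested index-based scan (outer while with an inner extend-with-break loop building the token by repeated string concatenation) by a single for-loop over the characters that accumulates the current run in a list and flushes it with one join on a non-token character and at the end.
import Mathlib
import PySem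

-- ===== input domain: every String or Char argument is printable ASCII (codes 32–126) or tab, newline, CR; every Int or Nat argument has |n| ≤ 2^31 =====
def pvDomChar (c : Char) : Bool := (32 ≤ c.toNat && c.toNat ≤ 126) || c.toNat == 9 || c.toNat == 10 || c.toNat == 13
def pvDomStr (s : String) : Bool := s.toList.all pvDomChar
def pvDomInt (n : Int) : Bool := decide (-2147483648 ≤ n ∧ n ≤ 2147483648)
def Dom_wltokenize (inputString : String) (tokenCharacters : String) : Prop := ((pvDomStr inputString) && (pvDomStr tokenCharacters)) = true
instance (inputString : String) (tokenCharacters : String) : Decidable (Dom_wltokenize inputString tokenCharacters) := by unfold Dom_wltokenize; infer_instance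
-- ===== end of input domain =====

-- B replaces A's nested index-based scan with a single one-pass loop that accumulates the
-- current run of token characters and flushes it on a non-token character and at the end (simpler).

-- ===== PORT A =====
-- single-character `c in tokenCharacters` is exactly list membership of the character
def pvKey (tc : String) (c : Char) : Bool := tc.toList.contains c

-- A's inner while loop: extends tempToken while the next character is a token character;
-- returns (tempToken, remaining characters starting at the breaking character)
def pvInner (tc : String) : List Char → List Char → (List Char × List Char)
  | t, [] => (t, [])
  | t, c :: rs => if pvKey tc c then pvInner tc (t ++ [c]) rs else (t, c :: rs)

theorem pvInner_snd_length (tc : String) : ∀ (t rs : List Char), (pvInner tc t rs).2.length ≤ rs.length := by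
  intro t rs
  induction rs generalizing t with
  | nil => simp [pvInner]
  | cons c rs ih =>
    simp only [pvInner]
    split
    · exact Nat.le_trans (ih _) (Nat.le_succ _)
    · simp

-- A's outer while loop over the remaining characters
def wltokenizeGo (tc : String) : List Char → List String
  | [] => []
  | c :: rs =>
    if pvKey tc c then
      let p := pvInner tc [c] rs
      String.ofList p.1 :: wltokenizeGo tc p.2
    else
      wltokenizeGo tc rs
termination_by l => l.length
decreasing_by
  · have := pvInner_snd_length tc [c] rs
    simp; omega
  · simp

def wltokenize (inputString : String) (tokenCharacters : String) : List String :=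
  wltokenizeGo tokenCharacters inputString.toList

-- ===== PORT B =====
-- one step of B's for-loop: state = (tokens so far, current run)
def pvAltStep (tc : String) (st : List String × List Char) (c : Char) : List String × List Char :=
  if pvKey tc c then (st.1, st.2 ++ [c])
  else if st.2.isEmpty then st
  else (st.1 ++ [String.ofList st.2], [])

def wltokenize_alt (inputString : String) (tokenCharacters : String) : List String :=
  let st := inputString.toList.foldl (pvAltStep tokenCharacters) ([], [])
  if st.2.isEmpty then st.1 else st.1 ++ [String.ofList st.2]

-- ===== PRECONDITION & SPEC =====
def Spec_wltokenize (inputString : String) (tokenCharacters : String) (out : List String) : Prop := out = wltokenize_alt inputString tokenCharacters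
instance (inputString : String) (tokenCharacters : String) (out : List String) : Decidable (Spec_wltokenize inputString tokenCharacters out) := by unfold Spec_wltokenize; infer_instance

-- ===== CLAIM (what is proved, stated in full; the proofs are below) =====
def Claim_equal_wltokenize : Prop := ∀ (inputString : String) (tokenCharacters : String), Dom_wltokenize inputString tokenCharacters → Spec_wltokenize inputString tokenCharacters (wltokenize inputString tokenCharacters)

-- ===== LEMMAS AND PROOFS =====

theorem wltokenizeGo_nil (tc : String) : wltokenizeGo tc [] = [] := by
  rw [wltokenizeGo]

-- A's inner loop is "take the maximal run, keep the rest"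
theorem pvInner_eq (tc : String) : ∀ (rs t : List Char),
    pvInner tc t rs = (t ++ rs.takeWhile (pvKey tc), rs.dropWhile (pvKey tc)) := by
  intro rs
  induction rs with
  | nil => intro t; simp [pvInner]
  | cons c rs ih =>
    intro t
    by_cases h : pvKey tc c = true
    · simp [pvInner, h, ih]
    · simp [pvInner, h]

-- what the remaining fold of B produces, given the current run
def pvCont (tc : String) (run cs : List Char) : List String :=
  if run.isEmpty then wltokenizeGo tc cs
  else String.ofList (run ++ cs.takeWhile (pvKey tc)) :: wltokenizeGo tc (cs.dropWhile (pvKey tc))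

-- B's final flush of the pending run
def pvFlush (st : List String × List Char) : List String :=
  if st.2.isEmpty then st.1 else st.1 ++ [String.ofList st.2]

theorem pvFoldl_flush (tc : String) : ∀ (cs : List Char) (ts : List String) (run : List Char),
    pvFlush (cs.foldl (pvAltStep tc) (ts, run)) = ts ++ pvCont tc run cs := by
  intro cs
  induction cs with
  | nil =>
    intro ts run
    cases run with
    | nil => simp [pvFlush, pvCont, wltokenizeGo]
    | cons r rs => simp [pvFlush, pvCont, wltokenizeGo_nil]
  | cons c cs ih =>
    intro ts run
    simp only [List.foldl_cons]
    by_cases h : pvKey tc c = true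
    · have hstep : pvAltStep tc (ts, run) c = (ts, run ++ [c]) := by simp [pvAltStep, h]
      rw [hstep, ih]
      cases run with
      | nil =>
        simp [pvCont, wltokenizeGo, h, pvInner_eq]
      | cons r rs =>
        simp [pvCont, h]
    · cases run with
      | nil =>
        have hstep : pvAltStep tc (ts, ([] : List Char)) c = (ts, []) := by simp [pvAltStep, h]
        rw [hstep, ih]
        simp [pvCont, wltokenizeGo, h]
      | cons r rs =>
        have hstep : pvAltStep tc (ts, r :: rs) c = (ts ++ [String.ofList (r :: rs)], []) := by
          simp [pvAltStep, h]
        rw [hstep, ih]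
        simp [pvCont, wltokenizeGo, h]

-- ===== VERDICT (by name: the statement is the Claim_ definition above) =====
theorem wltokenize_spec : Claim_equal_wltokenize := by
  intro s tc _
  unfold Spec_wltokenize wltokenize wltokenize_alt
  show wltokenizeGo tc s.toList = pvFlush (s.toList.foldl (pvAltStep tc) ([], []))
  rw [pvFoldl_flush]
  simp [pvCont]
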